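-- pv_equiv track=rewrite | github.com/MistMezalla/Laptop-Backup | CS 201 (Algorithm)/Lecture Qns/Python/Job Scheduling.py | minimize_time_in_system
-- ===== SOURCE A (Python) =====
-- def minimize_time_in_system(jobs):
--     jobs.sort(key=lambda x: x[1])
--
--     total_time = 0
--     current_time = 0
--
--     for job, processing_time in jobs:
--         current_time += processing_time
--         total_time += current_time
--
--     return total_time
-- ===== SOURCE B (Python) =====
-- def minimize_time_in_system(jobs):
--     # Return-value equivalent to A; does NOT sort/mutate `jobs`:
--     # total completion time under SPT = sum(p) + sum over pairs of min(p_i, p_j).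
--     total = 0
--     seen = []
--     for _, p in jobs:
--         total += p
--         for q in seen:
--             total += min(p, q)
--         seen.append(p)
--     return total
-- ===== Notes on version B (the rewrite author's own statement) =====
-- stated objective: alternative
-- what changed: Drops the sort entirely: B computes the SPT total as sum(p) plus the pairwise sum of min(p_i, p_j) over the unsorted input (each pair's smaller job delays the other), so B does not mutate the argument while A sorts it in place; return values are proved equal.
import Mathlib
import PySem

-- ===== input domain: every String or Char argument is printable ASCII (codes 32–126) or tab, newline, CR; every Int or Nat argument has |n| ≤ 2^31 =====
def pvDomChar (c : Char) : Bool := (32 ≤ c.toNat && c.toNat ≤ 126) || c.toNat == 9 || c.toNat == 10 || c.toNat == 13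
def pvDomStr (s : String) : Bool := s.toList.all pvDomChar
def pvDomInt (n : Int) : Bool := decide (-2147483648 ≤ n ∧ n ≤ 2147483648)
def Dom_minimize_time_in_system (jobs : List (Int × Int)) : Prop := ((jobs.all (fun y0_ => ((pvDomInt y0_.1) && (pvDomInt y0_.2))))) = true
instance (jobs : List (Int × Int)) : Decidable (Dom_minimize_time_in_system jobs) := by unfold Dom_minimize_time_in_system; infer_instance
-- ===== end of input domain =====

-- B computes the SPT total without sorting, as sum(p) + the pairwise sum of min(p_i, p_j);
-- A sorts `jobs` in place while B does not mutate it — the equivalence proved is about the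
-- RETURN value only (alternative algorithm, O(n^2) vs O(n log n)).

-- ===== PORT A =====
def minimize_time_in_system (jobs : List (Int × Int)) : Int :=
  let sorted := PySem.List.sorted jobs (fun x => x.2)
  let res := sorted.foldl (fun (st : Int × Int) jp =>
      let current := st.2 + jp.2
      (st.1 + current, current)) (0, 0)
  res.1

-- ===== PORT B =====
def minimize_time_in_system_alt (jobs : List (Int × Int)) : Int :=
  let res := jobs.foldl (fun (st : Int × List Int) jp =>
      let p := jp.2
      let tot := st.2.foldl (fun acc q => acc + min p q) (st.1 + p)
      (tot, st.2 ++ [p])) (0, [])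
  res.1

-- ===== PRECONDITION & SPEC =====
def Spec_minimize_time_in_system (jobs : List (Int × Int)) (out : Int) : Prop := out = minimize_time_in_system_alt jobs
instance (jobs : List (Int × Int)) (out : Int) : Decidable (Spec_minimize_time_in_system jobs out) := by unfold Spec_minimize_time_in_system; infer_instance

-- ===== CLAIM (what is proved, stated in full; the proofs are below) =====
def Claim_equal_minimize_time_in_system : Prop := ∀ (jobs : List (Int × Int)), Dom_minimize_time_in_system jobs → Spec_minimize_time_in_system jobs (minimize_time_in_system jobs)

-- ===== LEMMAS AND PROOFS =====

/-- Sum of min over all unordered pairs of the list (head-against-tail recursion). -/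
def pvPairP : List Int → Int
  | [] => 0
  | a :: l => (l.map (fun b => min a b)).sum + pvPairP l

theorem pvPairP_perm {l l' : List Int} (h : l.Perm l') : pvPairP l = pvPairP l' := by
  induction h with
  | nil => rfl
  | cons a h ih =>
    simp only [pvPairP, ih, (h.map (fun b => min a b)).sum_eq]
  | swap a b l =>
    simp only [pvPairP, List.map_cons, List.sum_cons]
    rw [min_comm]; ring
  | trans _ _ ih1 ih2 => exact ih1.trans ih2

/-- B's inner loop: folding `acc + min p q` over `seen`. -/
theorem pv_inner (seen : List Int) (p acc : Int) :
    seen.foldl (fun acc q => acc + min p q) acc = acc + (seen.map (fun q => min p q)).sum := by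
  induction seen generalizing acc with
  | nil => simp
  | cons q t ih => simp [ih]; ring

/-- B's outer loop characterised: accumulated total plus future contributions. -/
theorem pv_loopB (l : List (Int × Int)) (tot : Int) (seen : List Int) :
    (l.foldl (fun (st : Int × List Int) jp =>
        let p := jp.2
        let tot := st.2.foldl (fun acc q => acc + min p q) (st.1 + p)
        (tot, st.2 ++ [p])) (tot, seen)).1
      = tot + (l.map Prod.snd).sum
        + ((l.map Prod.snd).map (fun p => (seen.map (fun q => min p q)).sum)).sum
        + pvPairP (l.map Prod.snd) := by
  induction l generalizing tot seen with
  | nil => simp [pvPairP]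
  | cons a t ih =>
    simp only [List.foldl_cons]
    rw [ih, pv_inner]
    simp only [List.map_cons, List.sum_cons, pvPairP]
    have h1 : ∀ p : Int, ((seen ++ [a.2]).map (fun q => min p q)).sum
        = (seen.map (fun q => min p q)).sum + min a.2 p := by
      intro p; simp [min_comm a.2 p]
    simp only [h1]
    have hsplit : ∀ (L : List Int) (f g : Int → Int),
        (L.map (fun p => f p + g p)).sum = (L.map f).sum + (L.map g).sum := by
      intro L f g
      induction L with
      | nil => simp
      | cons x xs ih2 => simp only [List.map_cons, List.sum_cons, ih2]; ring
    rw [hsplit (t.map Prod.snd) (fun p => (seen.map fun q => min p q).sum) (fun p => min a.2 p)]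
    ring

/-- On a list sorted by snd, min of the head's snd against a later snd is the head's snd. -/
theorem pv_min_sum (p : Int) (l : List Int) (h : ∀ b ∈ l, p ≤ b) :
    (l.map (fun b => min p b)).sum = (l.length : Int) * p := by
  induction l with
  | nil => simp
  | cons b t ih =>
    have := h b (by simp)
    simp only [List.map_cons, List.sum_cons, min_eq_left this,
      ih (fun c hc => h c (by simp [hc])), List.length_cons]
    push_cast; ring

/-- A's loop on a list whose snds are non-decreasing. -/
theorem pv_loopA (s : List (Int × Int)) (tot cur : Int)
    (h : s.Pairwise (fun a b => a.2 ≤ b.2)) :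
    (s.foldl (fun (st : Int × Int) jp =>
        let current := st.2 + jp.2
        (st.1 + current, current)) (tot, cur)).1
      = tot + (s.length : Int) * cur + (s.map Prod.snd).sum + pvPairP (s.map Prod.snd) := by
  induction s generalizing tot cur with
  | nil => simp [pvPairP]
  | cons a t ih =>
    rcases List.pairwise_cons.mp h with ⟨hhead, htail⟩
    simp only [List.foldl_cons, ih _ _ htail, List.map_cons, List.sum_cons, pvPairP,
      List.length_cons]
    have : ((t.map Prod.snd).map (fun b => min a.2 b)).sum = ((t.map Prod.snd).length : Int) * a.2 := by
      refine pv_min_sum a.2 _ ?_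
      intro b hb
      rcases List.mem_map.mp hb with ⟨x, hx, rfl⟩
      exact hhead x hx
    rw [this, List.length_map]
    push_cast; ring

-- ===== VERDICT (by name: the statement is the Claim_ definition above) =====
theorem minimize_time_in_system_spec : Claim_equal_minimize_time_in_system := by
  intro jobs _
  unfold Spec_minimize_time_in_system minimize_time_in_system minimize_time_in_system_alt
  rw [pv_loopA _ _ _ (PySem.List.sorted_pairwise jobs (fun x => x.2) )]
  rw [pv_loopB]
  have hperm : ((PySem.List.sorted jobs (fun x => x.2)).map Prod.snd).Perm (jobs.map Prod.snd) :=
    List.Perm.map Prod.snd (PySem.List.sorted_perm jobs (fun x => x.2) false)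
  rw [pvPairP_perm hperm, hperm.sum_eq]
  simp [Function.comp_def]
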